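-- pv_equiv track=rewrite | github.com/miliar/Code_Jam_Webscraper | Solutions_in_python/Problem_76/problemC.py | generateSet
-- ===== SOURCE A (Python) =====
-- def generateSet( l ):
-- 	gs = []
-- 	for i in range( 1 <<  len( l ) ):
-- 		tmp1 = []
-- 		tmp2 = []
-- 		for j in range( len ( l ) ):
-- 			if( i & ( 1 << j ) ):
-- 				tmp1.append( l[ j ] )
-- 			else:
-- 				tmp2.append( l[ j ] )
-- 		gs.append( ( tmp1, tmp2 ) )
-- 	return gs
-- ===== SOURCE B (Python) =====
-- def generateSet(l):
--     if not l:
--         return [([], [])]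
--     x = l[0]
--     out = []
--     for a, b in generateSet(l[1:]):
--         out.append((a, [x] + b))
--         out.append(([x] + a, b))
--     return out
-- ===== Notes on version B (the rewrite author's own statement) =====
-- stated objective: alternative
-- what changed: Replaces the bitmask double loop (counter i over range(2**n), inner scan testing bit j) with structural recursion on the list: recurse on the tail and emit, for each sub-partition, the pair with the head prepended to the right side first, then to the left side, which reproduces the bitmask order exactly.
import Mathlib
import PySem

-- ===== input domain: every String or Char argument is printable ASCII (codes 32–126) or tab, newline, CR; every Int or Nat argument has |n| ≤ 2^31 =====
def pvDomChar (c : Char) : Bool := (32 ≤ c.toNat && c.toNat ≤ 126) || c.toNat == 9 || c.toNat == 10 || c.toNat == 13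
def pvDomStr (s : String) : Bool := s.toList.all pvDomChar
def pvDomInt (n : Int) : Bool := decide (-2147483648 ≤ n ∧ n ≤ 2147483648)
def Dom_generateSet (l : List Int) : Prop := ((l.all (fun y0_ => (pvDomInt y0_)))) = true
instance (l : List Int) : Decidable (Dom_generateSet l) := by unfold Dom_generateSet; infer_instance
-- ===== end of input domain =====

-- B replaces A's bitmask double loop with structural recursion on the list (same output, same order); objective: alternative.

-- ===== PORT A =====
-- bitmask enumeration: for i in range(1 << len(l)), partition by bit j of i.
-- i and j produced by range are ≥ 0, so the Nat bit test i.toNat &&& (1 <<< j.toNat) is exactly Python's i & (1 << j).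
def generateSet (l : List Int) : List (List Int × List Int) :=
  (PySem.List.pyRange 0 ((1 <<< l.length : Nat) : Int) 1).foldl
    (fun gs i =>
      let t :=
        (PySem.List.pyRange 0 (l.length : Int) 1).foldl
          (fun (t : List Int × List Int) j =>
            if i.toNat &&& (1 <<< j.toNat) ≠ 0 then
              (t.1 ++ [PySem.List.pyGetD l j 0], t.2)
            else
              (t.1, t.2 ++ [PySem.List.pyGetD l j 0]))
          ([], [])
      gs ++ [(t.1, t.2)])
    []

-- ===== PORT B =====
def generateSet_alt : List Int → List (List Int × List Int)
  | [] => [([], [])]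
  | x :: t =>
      (generateSet_alt t).foldl
        (fun out p => out ++ [(p.1, x :: p.2), (x :: p.1, p.2)]) []

-- ===== PRECONDITION & SPEC =====
def Spec_generateSet (l : List Int) (out : List (List Int × List Int)) : Prop := out = generateSet_alt l
instance (l : List Int) (out : List (List Int × List Int)) : Decidable (Spec_generateSet l out) := by unfold Spec_generateSet; infer_instance

-- ===== CLAIM (what is proved, stated in full; the proofs are below) =====
def Claim_equal_generateSet : Prop := ∀ (l : List Int), Dom_generateSet l → Spec_generateSet l (generateSet l)

-- ===== LEMMAS AND PROOFS =====

/-- Partition of `l` by the low bits of `i` (bit `k` set ⇒ `l[k]` goes left). -/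
def pvPart : List Int → Nat → List Int × List Int
  | [], _ => ([], [])
  | x :: t, i =>
      let p := pvPart t (i / 2)
      if i % 2 = 1 then (x :: p.1, p.2) else (p.1, x :: p.2)

theorem pvPart_snoc (l : List Int) (x : Int) (i : Nat) :
    pvPart (l ++ [x]) i =
      if i.testBit l.length then ((pvPart l i).1 ++ [x], (pvPart l i).2)
      else ((pvPart l i).1, (pvPart l i).2 ++ [x]) := by
  induction l generalizing i with
  | nil =>
      simp only [List.nil_append, pvPart, List.length_nil, Nat.testBit_zero]
      by_cases h : i % 2 = 1 <;> simp [h]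
  | cons y t ih =>
      simp only [List.cons_append, pvPart, ih (i / 2), List.length_cons, Nat.testBit_add_one]
      by_cases hb : (i / 2).testBit t.length <;>
        by_cases h : i % 2 = 1 <;> simp [hb, h]

/-- The inner-loop body of A, over `Nat` indices. -/
def pvStep (l : List Int) (i : Nat) (t : List Int × List Int) (j : Nat) : List Int × List Int :=
  if i &&& (1 <<< j) ≠ 0 then (t.1 ++ [l.getD j 0], t.2) else (t.1, t.2 ++ [l.getD j 0])

theorem pvStep_cond (i j : Nat) : (i &&& (1 <<< j) ≠ 0) ↔ i.testBit j := by
  rw [Nat.shiftLeft_eq, one_mul, Nat.and_two_pow]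
  by_cases h : i.testBit j <;> simp [h]

theorem pvInner_eq (l : List Int) (i : Nat) :
    (List.range l.length).foldl (pvStep l i) ([], []) = pvPart l i := by
  induction l using List.reverseRecOn with
  | nil => simp [pvPart]
  | append_singleton t x ih =>
      rw [List.length_append, List.length_singleton, List.range_succ, List.foldl_append]
      have hcong : (List.range t.length).foldl (pvStep (t ++ [x]) i) ([], [])
          = (List.range t.length).foldl (pvStep t i) ([], []) := by
        apply PySem.List.foldl_congr_mem
        intro acc j hj
        have hjlt : j < t.length := List.mem_range.mp hj
        have hg : (t ++ [x])[j]? = t[j]? := List.getElem?_append_left hjlt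
        simp [pvStep, List.getD, hg]
      rw [hcong, ih]
      have hget : (t ++ [x]).getD t.length 0 = x := by
        simp [List.getD]
      simp only [List.foldl_cons, List.foldl_nil, pvStep, hget]
      rw [pvPart_snoc]
      by_cases h : i.testBit t.length <;> simp [h, pvStep_cond]

theorem A_char (l : List Int) :
    generateSet l = (List.range (2 ^ l.length)).map (pvPart l) := by
  have h2 : ((1 <<< l.length : Nat) : Int) = ((2 ^ l.length : Nat) : Int) := by
    rw [Nat.shiftLeft_eq, one_mul]
  have hrow : ∀ k : Nat,
      (PySem.List.pyRange 0 (l.length : Int) 1).foldl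
        (fun (t : List Int × List Int) j =>
          if ((k : Int)).toNat &&& 1 <<< j.toNat ≠ 0 then (t.1 ++ [PySem.List.pyGetD l j 0], t.2)
          else (t.1, t.2 ++ [PySem.List.pyGetD l j 0])) ([], []) = pvPart l k := by
    intro k
    rw [PySem.List.pyRange_zero_nat, List.foldl_map]
    rw [show (fun (t : List Int × List Int) (j : Nat) =>
          if ((k : Int)).toNat &&& 1 <<< ((j : Int)).toNat ≠ 0 then
            (t.1 ++ [PySem.List.pyGetD l (j : Int) 0], t.2)
          else (t.1, t.2 ++ [PySem.List.pyGetD l (j : Int) 0])) = pvStep l k by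
        funext t j
        simp [pvStep, Int.toNat_natCast, PySem.List.pyGetD_natCast]]
    exact pvInner_eq l k
  unfold generateSet
  rw [h2, PySem.List.pyRange_zero_nat (2 ^ l.length), List.foldl_map]
  induction (2 ^ l.length) with
  | zero => simp
  | succ m ih =>
      rw [List.range_succ, List.foldl_append, List.map_append, ih]
      simp only [List.foldl_cons, List.foldl_nil, List.map_singleton]
      rw [hrow m]

theorem pvRange_two_mul (m : Nat) :
    List.range (2 * m) = (List.range m).flatMap (fun q => [2 * q, 2 * q + 1]) := by
  induction m with
  | zero => simp
  | succ m ih =>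
      rw [show 2 * (m + 1) = (2 * m + 1) + 1 by ring, List.range_succ, List.range_succ,
        List.range_succ, List.flatMap_append, ← ih]
      simp

theorem pvPart_even (x : Int) (t : List Int) (q : Nat) :
    pvPart (x :: t) (2 * q) = ((pvPart t q).1, x :: (pvPart t q).2) := by
  simp [pvPart, Nat.mul_mod_right]
theorem pvPart_odd (x : Int) (t : List Int) (q : Nat) :
    pvPart (x :: t) (2 * q + 1) = (x :: (pvPart t q).1, (pvPart t q).2) := by
  have h1 : (2 * q + 1) % 2 = 1 := by omega
  have h2 : (2 * q + 1) / 2 = q := by omega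
  simp [pvPart, h1, h2]

theorem B_char (l : List Int) :
    generateSet_alt l = (List.range (2 ^ l.length)).map (pvPart l) := by
  induction l with
  | nil => simp [generateSet_alt, pvPart]
  | cons x t ih =>
      rw [generateSet_alt, ih, PySem.List.foldl_append_eq_flatMap, List.nil_append,
        List.flatMap_map,
        show (x :: t).length = t.length + 1 from rfl, pow_succ, mul_comm (2 ^ t.length) 2,
        pvRange_two_mul, List.map_flatMap]
      apply List.flatMap_congr
      intro q _
      simp [pvPart_even, pvPart_odd]

-- ===== VERDICT (by name: the statement is the Claim_ definition above) =====
theorem generateSet_spec : Claim_equal_generateSet := by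
  intro l _
  unfold Spec_generateSet
  rw [A_char, B_char]
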